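-- pv_equiv track=rewrite | github.com/frosty865/PSA-Toolbox | tools/cisa-site-assessment/tools/refine_baseline_migration_resilience.py | is_resilience_eligible
-- ===== SOURCE A (Python) =====
-- RESILIENCE_ELIGIBLE_SUBTYPES = {
--     # Video Surveillance Systems
--     'VSS_RECORDING_STORAGE_NVR_DVR',
--     'VSS_SYSTEM_ARCHITECTURE',
--     'Recording / Storage (NVR/DVR)',
--     'System Architecture',
--
--     # Intrusion Detection Systems
--     'IDS_ALARM_PANELS',
--     'Alarm Panels',
--
--     # Access Control Systems
--     # Note: "Electronic Access Control" may include controllers/panels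
--     # If a specific "Controllers / Panels" subtype exists, it should be added here
--     'ACS_ELECTRONIC_ACCESS_CONTROL',  # May include controllers/panels
--     'Electronic Access Control',
--
--     # IDS Power / Backup - check for power-related subtypes
--     # Note: "Backup Communications" is Communications discipline, not IDS
-- }
--
-- RESILIENCE_NAME_PATTERNS = [
--     'controller',
--     'panel',
--     'recording',
--     'storage',
--     'architecture',
--     'backup',
--     'power',
--     'redundancy',
--     'sensitive item storage'  # Centralized dependency
-- ]
--
-- def is_resilience_eligible(subtype_name: str, subtype_code: str = None, discipline_name: str = None) -> bool:
--     """
--     Check if a subtype is resilience-eligible.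
--     Based on: system-level and failure-sensitive subtypes with centralized dependency or single-point failure risk.
--     """
--     # Check exact matches
--     if subtype_code and subtype_code in RESILIENCE_ELIGIBLE_SUBTYPES:
--         return True
--     if subtype_name in RESILIENCE_ELIGIBLE_SUBTYPES:
--         return True
--
--     # Check name patterns (case-insensitive)
--     subtype_lower = subtype_name.lower()
--     discipline_lower = (discipline_name or '').lower()
--
--     for pattern in RESILIENCE_NAME_PATTERNS:
--         if pattern in subtype_lower:
--             # Additional context checks
--             if 'controller' in subtype_lower or 'panel' in subtype_lower:
--                 # Must be ACS, IDS, or VSS discipline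
--                 if 'access control' in discipline_lower or 'intrusion detection' in discipline_lower or 'video surveillance' in discipline_lower:
--                     return True
--             if 'recording' in subtype_lower or 'storage' in subtype_lower:
--                 # Must be VSS
--                 if 'video surveillance' in discipline_lower:
--                     return True
--             if 'architecture' in subtype_lower:
--                 # Must be VSS
--                 if 'video surveillance' in discipline_lower:
--                     return True
--             if 'alarm' in subtype_lower and 'panel' in subtype_lower:
--                 # Must be IDS
--                 if 'intrusion detection' in discipline_lower:
--                     return True
--             if 'backup' in subtype_lower or 'power' in subtype_lower:
--                 # Must be IDS, Communications, or Emergency Management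
--                 if 'intrusion detection' in discipline_lower or 'communications' in discipline_lower or 'emergency' in discipline_lower:
--                     return True
--             if 'sensitive item storage' in subtype_lower:
--                 # Centralized dependency
--                 return True
--             if 'redundancy' in subtype_lower:
--                 # Redundancy systems
--                 return True
--
--     return False
-- ===== SOURCE B (Python) =====
-- RESILIENCE_ELIGIBLE_SUBTYPES = {
--     'VSS_RECORDING_STORAGE_NVR_DVR',
--     'VSS_SYSTEM_ARCHITECTURE',
--     'Recording / Storage (NVR/DVR)',
--     'System Architecture',
--     'IDS_ALARM_PANELS',
--     'Alarm Panels',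
--     'ACS_ELECTRONIC_ACCESS_CONTROL',
--     'Electronic Access Control',
-- }
--
-- def is_resilience_eligible(subtype_name: str, subtype_code: str = None, discipline_name: str = None) -> bool:
--     if subtype_code and subtype_code in RESILIENCE_ELIGIBLE_SUBTYPES:
--         return True
--     if subtype_name in RESILIENCE_ELIGIBLE_SUBTYPES:
--         return True
--
--     sl = subtype_name.lower()
--     dl = (discipline_name or '').lower()
--
--     if ('controller' in sl or 'panel' in sl) and (
--             'access control' in dl or 'intrusion detection' in dl or 'video surveillance' in dl):
--         return True
--     if ('recording' in sl or 'storage' in sl) and 'video surveillance' in dl: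
--         return True
--     if 'architecture' in sl and 'video surveillance' in dl:
--         return True
--     if 'alarm' in sl and 'panel' in sl and 'intrusion detection' in dl:
--         return True
--     if ('backup' in sl or 'power' in sl) and (
--             'intrusion detection' in dl or 'communications' in dl or 'emergency' in dl):
--         return True
--     if 'sensitive item storage' in sl:
--         return True
--     if 'redundancy' in sl:
--         return True
--     return False
-- ===== Notes on version B (the rewrite author's own statement) =====
-- stated objective: simpler
-- what changed: Removed the loop over RESILIENCE_NAME_PATTERNS entirely: since every substring tested inside the loop body is itself one of the patterns (or conjoined with one), the loop guard is logically redundant, so B evaluates the context-gated substring checks once as a flat early-return if-chain.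
import Mathlib
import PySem

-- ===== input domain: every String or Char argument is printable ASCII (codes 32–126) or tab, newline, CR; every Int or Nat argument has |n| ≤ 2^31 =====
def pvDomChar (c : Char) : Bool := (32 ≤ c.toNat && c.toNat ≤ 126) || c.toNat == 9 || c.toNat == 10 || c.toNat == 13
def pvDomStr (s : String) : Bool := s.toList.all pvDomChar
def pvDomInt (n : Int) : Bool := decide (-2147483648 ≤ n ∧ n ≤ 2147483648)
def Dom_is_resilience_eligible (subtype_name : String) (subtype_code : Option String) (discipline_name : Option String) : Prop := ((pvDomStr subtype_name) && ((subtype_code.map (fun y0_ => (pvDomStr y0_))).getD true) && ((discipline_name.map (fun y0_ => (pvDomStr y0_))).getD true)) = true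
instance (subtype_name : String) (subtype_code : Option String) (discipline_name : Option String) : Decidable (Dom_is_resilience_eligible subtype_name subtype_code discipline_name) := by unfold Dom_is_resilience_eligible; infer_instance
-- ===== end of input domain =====

-- B drops A's redundant loop over RESILIENCE_NAME_PATTERNS (every inner check already
-- requires one of the patterns as a substring) and runs the gated checks as one flat
-- if-chain: simpler, same return value everywhere.

-- ===== PORT A =====
def pvEligibleSet : PySem.Set String := PySem.Set.ofList
  ["VSS_RECORDING_STORAGE_NVR_DVR", "VSS_SYSTEM_ARCHITECTURE",
   "Recording / Storage (NVR/DVR)", "System Architecture",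
   "IDS_ALARM_PANELS", "Alarm Panels",
   "ACS_ELECTRONIC_ACCESS_CONTROL", "Electronic Access Control"]

def pvPatterns : List String :=
  ["controller", "panel", "recording", "storage", "architecture",
   "backup", "power", "redundancy", "sensitive item storage"]

-- the loop body of A: the sequence of context-gated 'return True' checks (fall-through = false)
def pvBodyA (sl dl : String) : Bool :=
  ((PySem.Str.isIn "controller" sl || PySem.Str.isIn "panel" sl) &&
     (PySem.Str.isIn "access control" dl || PySem.Str.isIn "intrusion detection" dl || PySem.Str.isIn "video surveillance" dl)) ||
  ((PySem.Str.isIn "recording" sl || PySem.Str.isIn "storage" sl) && PySem.Str.isIn "video surveillance" dl) ||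
  (PySem.Str.isIn "architecture" sl && PySem.Str.isIn "video surveillance" dl) ||
  (PySem.Str.isIn "alarm" sl && PySem.Str.isIn "panel" sl && PySem.Str.isIn "intrusion detection" dl) ||
  ((PySem.Str.isIn "backup" sl || PySem.Str.isIn "power" sl) &&
     (PySem.Str.isIn "intrusion detection" dl || PySem.Str.isIn "communications" dl || PySem.Str.isIn "emergency" dl)) ||
  PySem.Str.isIn "sensitive item storage" sl ||
  PySem.Str.isIn "redundancy" sl

-- A's 'for pattern in RESILIENCE_NAME_PATTERNS' loop
def pvLoopA (sl dl : String) : List String → Bool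
  | [] => false
  | p :: rest =>
      if PySem.Str.isIn p sl then
        (if pvBodyA sl dl then true else pvLoopA sl dl rest)
      else pvLoopA sl dl rest

def is_resilience_eligible (subtype_name : String) (subtype_code : Option String) (discipline_name : Option String) : Bool :=
  if (match subtype_code with
      | none => false
      | some c => decide (c ≠ "") && PySem.Set.contains pvEligibleSet c) then true
  else if PySem.Set.contains pvEligibleSet subtype_name then true
  else
    pvLoopA (PySem.Str.lower subtype_name)
            (PySem.Str.lower (discipline_name.getD "")) pvPatterns

-- ===== PORT B =====
def is_resilience_eligible_alt (subtype_name : String) (subtype_code : Option String) (discipline_name : Option String) : Bool :=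
  if (match subtype_code with
      | none => false
      | some c => decide (c ≠ "") && PySem.Set.contains pvEligibleSet c) then true
  else if PySem.Set.contains pvEligibleSet subtype_name then true
  else
    let sl := PySem.Str.lower subtype_name
    let dl := PySem.Str.lower (discipline_name.getD "")
    if (PySem.Str.isIn "controller" sl || PySem.Str.isIn "panel" sl) &&
       (PySem.Str.isIn "access control" dl || PySem.Str.isIn "intrusion detection" dl || PySem.Str.isIn "video surveillance" dl) then true
    else if (PySem.Str.isIn "recording" sl || PySem.Str.isIn "storage" sl) && PySem.Str.isIn "video surveillance" dl then true
    else if PySem.Str.isIn "architecture" sl && PySem.Str.isIn "video surveillance" dl then true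
    else if PySem.Str.isIn "alarm" sl && PySem.Str.isIn "panel" sl && PySem.Str.isIn "intrusion detection" dl then true
    else if (PySem.Str.isIn "backup" sl || PySem.Str.isIn "power" sl) &&
            (PySem.Str.isIn "intrusion detection" dl || PySem.Str.isIn "communications" dl || PySem.Str.isIn "emergency" dl) then true
    else if PySem.Str.isIn "sensitive item storage" sl then true
    else if PySem.Str.isIn "redundancy" sl then true
    else false

-- ===== PRECONDITION & SPEC =====
def Spec_is_resilience_eligible (subtype_name : String) (subtype_code : Option String) (discipline_name : Option String) (out : Bool) : Prop := out = is_resilience_eligible_alt subtype_name subtype_code discipline_name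
instance (subtype_name : String) (subtype_code : Option String) (discipline_name : Option String) (out : Bool) : Decidable (Spec_is_resilience_eligible subtype_name subtype_code discipline_name out) := by unfold Spec_is_resilience_eligible; infer_instance

-- ===== CLAIM (what is proved, stated in full; the proofs are below) =====
def Claim_equal_is_resilience_eligible : Prop := ∀ (subtype_name : String) (subtype_code : Option String) (discipline_name : Option String), Dom_is_resilience_eligible subtype_name subtype_code discipline_name → Spec_is_resilience_eligible subtype_name subtype_code discipline_name (is_resilience_eligible subtype_name subtype_code discipline_name)

-- ===== LEMMAS AND PROOFS =====

-- A's loop returns true iff some pattern occurs in sl AND the gated body fires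
theorem pvLoop_any (sl dl : String) (ps : List String) :
    pvLoopA sl dl ps = (ps.any (fun p => PySem.Str.isIn p sl) && pvBodyA sl dl) := by
  induction ps with
  | nil => simp [pvLoopA]
  | cons p rest ih =>
      simp only [pvLoopA, List.any_cons]
      cases h : PySem.Str.isIn p sl <;> cases hb : pvBodyA sl dl <;>
        simp_all [Bool.and_false, Bool.and_true]

-- every disjunct of the body requires a substring that is itself a pattern
theorem pvBody_imp_any (sl dl : String) (h : pvBodyA sl dl = true) :
    pvPatterns.any (fun p => PySem.Str.isIn p sl) = true := by
  simp only [pvBodyA, Bool.or_eq_true, Bool.and_eq_true] at h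
  rcases h with (((((⟨hc | hc, -⟩ | ⟨hc | hc, -⟩) | ⟨hc, -⟩) | ⟨⟨-, hc⟩, -⟩) | ⟨hc | hc, -⟩) | hc) | hc <;>
    refine List.any_eq_true.mpr ⟨_, ?_, hc⟩ <;> simp [pvPatterns]

-- A's loop equals B's flat chain
theorem pvLoop_eq_chain (sl dl : String) :
    pvLoopA sl dl pvPatterns =
      (if (PySem.Str.isIn "controller" sl || PySem.Str.isIn "panel" sl) &&
          (PySem.Str.isIn "access control" dl || PySem.Str.isIn "intrusion detection" dl || PySem.Str.isIn "video surveillance" dl) then true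
       else if (PySem.Str.isIn "recording" sl || PySem.Str.isIn "storage" sl) && PySem.Str.isIn "video surveillance" dl then true
       else if PySem.Str.isIn "architecture" sl && PySem.Str.isIn "video surveillance" dl then true
       else if PySem.Str.isIn "alarm" sl && PySem.Str.isIn "panel" sl && PySem.Str.isIn "intrusion detection" dl then true
       else if (PySem.Str.isIn "backup" sl || PySem.Str.isIn "power" sl) &&
               (PySem.Str.isIn "intrusion detection" dl || PySem.Str.isIn "communications" dl || PySem.Str.isIn "emergency" dl) then true
       else if PySem.Str.isIn "sensitive item storage" sl then true
       else if PySem.Str.isIn "redundancy" sl then true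
       else false) := by
  have hchain : (if (PySem.Str.isIn "controller" sl || PySem.Str.isIn "panel" sl) &&
          (PySem.Str.isIn "access control" dl || PySem.Str.isIn "intrusion detection" dl || PySem.Str.isIn "video surveillance" dl) then true
       else if (PySem.Str.isIn "recording" sl || PySem.Str.isIn "storage" sl) && PySem.Str.isIn "video surveillance" dl then true
       else if PySem.Str.isIn "architecture" sl && PySem.Str.isIn "video surveillance" dl then true
       else if PySem.Str.isIn "alarm" sl && PySem.Str.isIn "panel" sl && PySem.Str.isIn "intrusion detection" dl then true
       else if (PySem.Str.isIn "backup" sl || PySem.Str.isIn "power" sl) &&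
               (PySem.Str.isIn "intrusion detection" dl || PySem.Str.isIn "communications" dl || PySem.Str.isIn "emergency" dl) then true
       else if PySem.Str.isIn "sensitive item storage" sl then true
       else if PySem.Str.isIn "redundancy" sl then true
       else false) = pvBodyA sl dl := by
    simp [pvBodyA, Bool.if_true_left, Bool.or_assoc]
  rw [hchain, pvLoop_any]
  cases hb : pvBodyA sl dl with
  | false => simp
  | true => rw [Bool.and_true]; exact pvBody_imp_any sl dl hb

-- ===== VERDICT (by name: the statement is the Claim_ definition above) =====
theorem is_resilience_eligible_spec : Claim_equal_is_resilience_eligible := by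
  intro subtype_name subtype_code discipline_name _
  unfold Spec_is_resilience_eligible is_resilience_eligible is_resilience_eligible_alt
  rw [pvLoop_eq_chain]
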